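-- pv_equiv track=rewrite | github.com/WilliamSoderberg/volley-bracket | backend/logic.py | get_seeded_positions
-- ===== SOURCE A (Python) =====
-- def get_seeded_positions(num_slots, teams):
--     seeds = [1, 2]
--     while len(seeds) < num_slots:
--         next_seeds = []
--         for s in seeds:
--             next_seeds.append(s)
--             next_seeds.append(2 * len(seeds) + 1 - s)
--         seeds = next_seeds
--     return [teams[s - 1] if s <= len(teams) else "BYE" for s in seeds]
-- ===== SOURCE B (Python) =====
-- def get_seeded_positions(num_slots, teams):
--     # effective bracket size: doubling from 2 until >= num_slots
--     n, m = 2, 1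
--     while n < num_slots:
--         n, m = 2 * n, m + 1
--
--     def seed_at(lvl, i):
--         # seed occupying position i in a bracket of 2**lvl slots,
--         # computed independently from the bits of i
--         if lvl <= 1:
--             return i + 1
--         v = seed_at(lvl - 1, i // 2)
--         return v if i % 2 == 0 else 2 ** lvl + 1 - v
--
--     return [teams[s - 1] if s <= len(teams) else "BYE"
--             for s in (seed_at(m, i) for i in range(n))]
-- ===== Notes on version B (the rewrite author's own statement) =====
-- stated objective: alternative
-- what changed: A builds the seed order by repeatedly doubling the whole list; B computes the effective bracket size once and derives each position's seed independently by a recursion on the bits of its index, then maps teams/BYE in one comprehension.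
import Mathlib
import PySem

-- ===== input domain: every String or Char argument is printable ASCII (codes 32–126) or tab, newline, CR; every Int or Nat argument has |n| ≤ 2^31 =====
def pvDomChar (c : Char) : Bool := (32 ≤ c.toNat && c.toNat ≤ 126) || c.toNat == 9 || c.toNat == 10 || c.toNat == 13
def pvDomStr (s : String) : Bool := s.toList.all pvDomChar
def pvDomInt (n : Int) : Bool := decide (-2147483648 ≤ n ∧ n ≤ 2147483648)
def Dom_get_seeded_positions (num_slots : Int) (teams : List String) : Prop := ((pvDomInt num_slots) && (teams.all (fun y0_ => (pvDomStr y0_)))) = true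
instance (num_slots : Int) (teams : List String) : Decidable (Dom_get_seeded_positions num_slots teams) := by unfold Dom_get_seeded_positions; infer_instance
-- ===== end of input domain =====

-- B replaces A's repeated list-doubling by a per-position bit-recursion formula (alternative decomposition, same cost class).

-- ===== PORT A =====
-- one pass of A's inner for-loop: next_seeds.append(s); next_seeds.append(2*len(seeds)+1-s)
def pvStepA (seeds : List Int) : List Int :=
  seeds.foldl (fun acc s => acc ++ [s] ++ [2 * (seeds.length : Int) + 1 - s]) []

theorem pvStepA_flat (seeds : List Int) :
    pvStepA seeds = seeds.flatMap (fun s => [s] ++ [2 * (seeds.length : Int) + 1 - s]) := by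
  unfold pvStepA
  simp only [List.append_assoc]
  exact PySem.List.foldl_append_eq_flatMap (fun s => [s] ++ [2 * (seeds.length : Int) + 1 - s]) seeds []

theorem pvStepA_length (seeds : List Int) : (pvStepA seeds).length = 2 * seeds.length := by
  rw [pvStepA_flat]
  induction seeds with
  | nil => simp
  | cons a t ih => simp_all [List.flatMap_cons]; omega

-- A's while loop; the 1 ≤ seeds.length hypothesis only serves termination (A always calls it with [1,2])
def pvLoopA (num_slots : Int) (seeds : List Int) (h : 1 ≤ seeds.length) : List Int :=
  if (seeds.length : Int) < num_slots then
    pvLoopA num_slots (pvStepA seeds) (by rw [pvStepA_length]; omega)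
  else seeds
termination_by num_slots.toNat - seeds.length
decreasing_by
  rw [pvStepA_length]
  rename_i hc
  omega

def get_seeded_positions (num_slots : Int) (teams : List String) : List String :=
  (pvLoopA num_slots [1, 2] (by simp)).map
    (fun s => if s ≤ (teams.length : Int) then (PySem.List.pyGet? teams (s - 1)).getD "BYE" else "BYE")

-- ===== PORT B =====
-- seed occupying position i in a bracket of 2^lvl slots (Source B's seed_at)
def pvSeedAt : Nat → Nat → Int
  | 0, i => (i : Int) + 1
  | 1, i => (i : Int) + 1
  | (l+2), i =>
    let v := pvSeedAt (l+1) (i / 2)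
    if i % 2 == 0 then v else 2 ^ (l+2) + 1 - v

-- Source B's while loop computing (n, m); 1 ≤ n only serves termination (B always starts at n = 2)
def pvLoopB (num_slots : Int) (n : Int) (m : Nat) (hn : 1 ≤ n) : Int × Nat :=
  if n < num_slots then pvLoopB num_slots (2 * n) (m + 1) (by omega)
  else (n, m)
termination_by num_slots.toNat - n.toNat
decreasing_by omega

def get_seeded_positions_alt (num_slots : Int) (teams : List String) : List String :=
  let nm := pvLoopB num_slots 2 1 (by norm_num)
  (List.range nm.1.toNat).map
    (fun i =>
      let s := pvSeedAt nm.2 i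
      if s ≤ (teams.length : Int) then (PySem.List.pyGet? teams (s - 1)).getD "BYE" else "BYE")

-- ===== PRECONDITION & SPEC =====
def Spec_get_seeded_positions (num_slots : Int) (teams : List String) (out : List String) : Prop := out = get_seeded_positions_alt num_slots teams
instance (num_slots : Int) (teams : List String) (out : List String) : Decidable (Spec_get_seeded_positions num_slots teams out) := by unfold Spec_get_seeded_positions; infer_instance

-- ===== CLAIM (what is proved, stated in full; the proofs are below) =====
def Claim_equal_get_seeded_positions : Prop := ∀ (num_slots : Int) (teams : List String), Dom_get_seeded_positions num_slots teams → Spec_get_seeded_positions num_slots teams (get_seeded_positions num_slots teams)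

-- ===== LEMMAS AND PROOFS =====

theorem pvLoopA_congr (ns : Int) {xs ys : List Int} (hxy : xs = ys)
    (h1 : 1 ≤ xs.length) (h2 : 1 ≤ ys.length) :
    pvLoopA ns xs h1 = pvLoopA ns ys h2 := by cases hxy; rfl

theorem pvLoopB_congr (ns : Int) {n n' : Int} (m : Nat) (hnn : n = n')
    (h1 : 1 ≤ n) (h2 : 1 ≤ n') :
    pvLoopB ns n m h1 = pvLoopB ns n' m h2 := by cases hnn; rfl

theorem pv_flatMap_range (f : Nat → Int) (c : Int) (L : Nat) :
    ((List.range L).map f).flatMap (fun s => [s, c - s])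
      = (List.range (2 * L)).map (fun i => if i % 2 == 0 then f (i / 2) else c - f (i / 2)) := by
  induction L with
  | zero => simp
  | succ L ih =>
    rw [List.range_succ, show 2 * (L + 1) = (2 * L + 1) + 1 by omega, List.range_succ,
      List.range_succ]
    simp only [List.map_append, List.flatMap_append, List.map_cons, List.map_nil,
      List.flatMap_cons, List.flatMap_nil, List.append_nil, List.singleton_append,
      List.append_assoc]
    rw [ih]
    congr 2
    · have : ((2 * L) % 2 == 0) = true := by simp [Nat.mul_mod_right]
      rw [this, if_pos rfl, show 2 * L / 2 = L by omega]
    · congr 1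
      have h4 : ((2 * L + 1) % 2 == 0) = false := by
        simp only [beq_eq_false_iff_ne, ne_eq]; omega
      rw [h4]
      simp only [Bool.false_eq_true, if_false, show (2 * L + 1) / 2 = L by omega]

theorem pvStepA_seed (m : Nat) (hm : 1 ≤ m) :
    pvStepA ((List.range (2 ^ m)).map (pvSeedAt m))
      = (List.range (2 ^ (m + 1))).map (pvSeedAt (m + 1)) := by
  obtain ⟨l, rfl⟩ : ∃ l, m = l + 1 := ⟨m - 1, by omega⟩
  rw [pvStepA_flat]
  simp only [List.length_map, List.length_range]
  simp only [List.singleton_append]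
  rw [show (2 * ((2 ^ (l + 1) : Nat) : Int) + 1) = 2 ^ (l + 2) + 1 from by push_cast; ring]
  rw [pv_flatMap_range (pvSeedAt (l + 1)) (2 ^ (l + 2) + 1) (2 ^ (l + 1))]
  rw [show 2 * 2 ^ (l + 1) = 2 ^ (l + 1 + 1) from by ring]
  apply List.map_congr_left
  intro i _
  show (if i % 2 == 0 then pvSeedAt (l + 1) (i / 2) else 2 ^ (l + 2) + 1 - pvSeedAt (l + 1) (i / 2))
      = pvSeedAt (l + 2) i
  rw [pvSeedAt]

theorem pv_loop_eq (ns : Int) (m : Nat) (hm : 1 ≤ m)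
    (h : 1 ≤ ((List.range (2 ^ m)).map (pvSeedAt m)).length) (hn : 1 ≤ ((2 ^ m : Nat) : Int)) :
    pvLoopA ns ((List.range (2 ^ m)).map (pvSeedAt m)) h
      = (List.range ((pvLoopB ns ((2 ^ m : Nat) : Int) m hn).1).toNat).map
          (pvSeedAt (pvLoopB ns ((2 ^ m : Nat) : Int) m hn).2) := by
  rw [pvLoopA, pvLoopB]
  simp only [List.length_map, List.length_range]
  by_cases hc : ((2 ^ m : Nat) : Int) < ns
  · rw [if_pos hc, if_pos hc]
    refine Eq.trans (pvLoopA_congr ns (pvStepA_seed m hm) _ (by simp [Nat.one_le_two_pow])) ?_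
    rw [pv_loop_eq ns (m + 1) (by omega) (by simp [Nat.one_le_two_pow]) (by exact_mod_cast Nat.one_le_two_pow)]
    rw [pvLoopB_congr ns (m + 1) (show (2 * ((2 ^ m : Nat) : Int)) = ((2 ^ (m + 1) : Nat) : Int) from by push_cast; ring) (by omega) (by exact_mod_cast Nat.one_le_two_pow)]
  · rw [if_neg hc, if_neg hc]
    have ht : ((2 ^ m : Nat) : Int).toNat = 2 ^ m := by omega
    rw [ht]
termination_by ns.toNat - 2 ^ m
decreasing_by
  have h0 : (0 : Nat) < 2 ^ m := Nat.two_pow_pos m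
  have h1 : ((2 ^ m : Nat) : Int) < ns := hc
  have h2 : (2 ^ m : Nat) < ns.toNat := by omega
  have h3 : (2 ^ m : Nat) < 2 ^ (m + 1) := by
    calc (2 ^ m : Nat) < 2 ^ m + 2 ^ m := by omega
      _ = 2 ^ (m + 1) := by ring
  omega

-- ===== VERDICT (by name: the statement is the Claim_ definition above) =====
theorem get_seeded_positions_spec : Claim_equal_get_seeded_positions := by
  intro ns teams _
  unfold Spec_get_seeded_positions get_seeded_positions get_seeded_positions_alt
  rw [pvLoopA_congr ns (show ([1, 2] : List Int) = (List.range (2 ^ 1)).map (pvSeedAt 1) from by decide) (by simp) (by simp)]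
  rw [pv_loop_eq ns 1 (by norm_num) (by simp) (by norm_num)]
  rw [List.map_map]
  rw [pvLoopB_congr ns 1 (show (2 : Int) = ((2 ^ 1 : Nat) : Int) from by norm_num) (by norm_num) (by norm_num)]
  rfl
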